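-- pv_equiv track=rewrite | github.com/SREESAIARJUN/AI-Real-Time-Research-Agent | streamlit_app.py | generate_intelligent_followups
-- ===== SOURCE A (Python) =====
-- from typing import List, Dict, Any
--
-- def generate_intelligent_followups(query: str, response: str) -> List[str]:
--     """Generate contextually relevant follow-up questions"""
--
--     # Analyze query and response for context
--     query_lower = query.lower()
--     response_lower = response.lower()
--
--     # Category-based follow-ups
--     followups = []
--
--     if any(term in query_lower for term in ['technology', 'ai', 'software', 'digital']):
--         followups = [
--             "What are the latest technological advancements in this field?",
--             "How might this technology impact different industries?",
--             "What are the potential risks or limitations to consider?"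
--         ]
--     elif any(term in query_lower for term in ['market', 'business', 'economic', 'financial']):
--         followups = [
--             "What are the current market trends and projections?",
--             "How do competitors compare in this space?",
--             "What economic factors might influence these developments?"
--         ]
--     elif any(term in query_lower for term in ['health', 'medical', 'research', 'scientific']):
--         followups = [
--             "What does the latest research reveal about this topic?",
--             "Are there any ongoing clinical trials or studies?",
--             "What are the practical implications for healthcare?"
--         ]
--     elif any(term in query_lower for term in ['education', 'learning', 'academic']):
--         followups = [
--             "What are the most effective learning approaches for this topic?",
--             "How is this subject being taught in modern curricula?",
--             "What resources would you recommend for deeper study?"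
--         ]
--     else:
--         # Generic intelligent follow-ups
--         followups = [
--             "What are the most significant recent developments in this area?",
--             "How does this compare to similar concepts or alternatives?",
--             "What practical applications or implications should I consider?"
--         ]
--
--     return followups
-- ===== SOURCE B (Python) =====
-- from typing import List
--
-- # Flat keyword -> category-index map; category lists indexed 0..3, 4 = generic default.
-- _KEYWORD_CATEGORY = {
--     "technology": 0, "ai": 0, "software": 0, "digital": 0,
--     "market": 1, "business": 1, "economic": 1, "financial": 1,
--     "health": 2, "medical": 2, "research": 2, "scientific": 2,
--     "education": 3, "learning": 3, "academic": 3,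
-- }
--
-- _FOLLOWUPS = [
--     ["What are the latest technological advancements in this field?",
--      "How might this technology impact different industries?",
--      "What are the potential risks or limitations to consider?"],
--     ["What are the current market trends and projections?",
--      "How do competitors compare in this space?",
--      "What economic factors might influence these developments?"],
--     ["What does the latest research reveal about this topic?",
--      "Are there any ongoing clinical trials or studies?",
--      "What are the practical implications for healthcare?"],
--     ["What are the most effective learning approaches for this topic?",
--      "How is this subject being taught in modern curricula?",
--      "What resources would you recommend for deeper study?"],
--     ["What are the most significant recent developments in this area?",
--      "How does this compare to similar concepts or alternatives?",
--      "What practical applications or implications should I consider?"],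
-- ]
--
-- def generate_intelligent_followups(query: str, response: str) -> List[str]:
--     """Generate contextually relevant follow-up questions"""
--     query_lower = query.lower()
--     best = 4
--     for term, cat in _KEYWORD_CATEGORY.items():
--         if cat < best and term in query_lower:
--             best = cat
--     return list(_FOLLOWUPS[best])
-- ===== Notes on version B (the rewrite author's own statement) =====
-- stated objective: alternative
-- what changed: Replaces the per-category if/elif any()-chain with one unconditional pass over a flat keyword->category-index map that aggregates the minimum matching category index (4 = generic) and indexes a followup table with it.
import Mathlib
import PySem

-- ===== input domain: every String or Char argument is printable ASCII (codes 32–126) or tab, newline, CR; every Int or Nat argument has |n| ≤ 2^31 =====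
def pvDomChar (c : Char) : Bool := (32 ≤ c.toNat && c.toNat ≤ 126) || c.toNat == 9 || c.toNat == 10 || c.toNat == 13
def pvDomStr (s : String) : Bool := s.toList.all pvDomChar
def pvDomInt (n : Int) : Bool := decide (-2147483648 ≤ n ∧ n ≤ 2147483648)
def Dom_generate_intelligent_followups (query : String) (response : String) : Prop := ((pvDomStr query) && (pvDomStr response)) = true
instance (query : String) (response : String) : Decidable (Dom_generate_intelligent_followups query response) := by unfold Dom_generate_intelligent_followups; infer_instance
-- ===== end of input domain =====

-- B replaces the per-category if/elif any()-chain by one unconditional pass over a flat keyword->category map that keeps the minimum matching category index (4 = generic) and indexes a followup table with it (alternative decomposition, same cost).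


-- ===== PORT A =====
def generate_intelligent_followups (query : String) (response : String) : List String :=
  let query_lower := PySem.Str.lower query
  let _response_lower := PySem.Str.lower response
  if (["technology", "ai", "software", "digital"].any (fun term => PySem.Str.isIn term query_lower)) then
    ["What are the latest technological advancements in this field?",
     "How might this technology impact different industries?",
     "What are the potential risks or limitations to consider?"]
  else if (["market", "business", "economic", "financial"].any (fun term => PySem.Str.isIn term query_lower)) then
    ["What are the current market trends and projections?",
     "How do competitors compare in this space?",
     "What economic factors might influence these developments?"]
  else if (["health", "medical", "research", "scientific"].any (fun term => PySem.Str.isIn term query_lower)) then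
    ["What does the latest research reveal about this topic?",
     "Are there any ongoing clinical trials or studies?",
     "What are the practical implications for healthcare?"]
  else if (["education", "learning", "academic"].any (fun term => PySem.Str.isIn term query_lower)) then
    ["What are the most effective learning approaches for this topic?",
     "How is this subject being taught in modern curricula?",
     "What resources would you recommend for deeper study?"]
  else
    ["What are the most significant recent developments in this area?",
     "How does this compare to similar concepts or alternatives?",
     "What practical applications or implications should I consider?"]

-- ===== PORT B =====
-- flat keyword -> category-index dict, in Source B's insertion order
def pvKeywordCategory : List (String × Nat) :=
  [("technology", 0), ("ai", 0), ("software", 0), ("digital", 0),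
   ("market", 1), ("business", 1), ("economic", 1), ("financial", 1),
   ("health", 2), ("medical", 2), ("research", 2), ("scientific", 2),
   ("education", 3), ("learning", 3), ("academic", 3)]

-- followup lists indexed 0..3, index 4 = generic default
def pvFollowups : List (List String) :=
  [["What are the latest technological advancements in this field?",
    "How might this technology impact different industries?",
    "What are the potential risks or limitations to consider?"],
   ["What are the current market trends and projections?",
    "How do competitors compare in this space?",
    "What economic factors might influence these developments?"],
   ["What does the latest research reveal about this topic?",
    "Are there any ongoing clinical trials or studies?",
    "What are the practical implications for healthcare?"],
   ["What are the most effective learning approaches for this topic?",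
    "How is this subject being taught in modern curricula?",
    "What resources would you recommend for deeper study?"],
   ["What are the most significant recent developments in this area?",
    "How does this compare to similar concepts or alternatives?",
    "What practical applications or implications should I consider?"]]

def generate_intelligent_followups_alt (query : String) (response : String) : List String :=
  let query_lower := PySem.Str.lower query
  let best := pvKeywordCategory.foldl
    (fun best tc => if tc.2 < best && PySem.Str.isIn tc.1 query_lower then tc.2 else best) 4
  pvFollowups.getD best []

-- ===== PRECONDITION & SPEC =====
def Spec_generate_intelligent_followups (query : String) (response : String) (out : List String) : Prop := out = generate_intelligent_followups_alt query response
instance (query : String) (response : String) (out : List String) : Decidable (Spec_generate_intelligent_followups query response out) := by unfold Spec_generate_intelligent_followups; infer_instance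

-- ===== CLAIM (what is proved, stated in full; the proofs are below) =====
def Claim_equal_generate_intelligent_followups : Prop := ∀ (query : String) (response : String), Dom_generate_intelligent_followups query response → Spec_generate_intelligent_followups query response (generate_intelligent_followups query response)

-- ===== LEMMAS AND PROOFS =====

-- B's fold step, named so the block lemma below can speak about it
def pvStep (best : Nat) (tc : Bool × Nat) : Nat := if tc.2 < best && tc.1 then tc.2 else best

-- folding a block of keywords that all carry the same category index c
theorem pvBlock (c best : Nat) (xs : List Bool) :
    (xs.map (fun x => (x, c))).foldl pvStep best = if c < best && xs.any id then c else best := by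
  induction xs generalizing best with
  | nil => simp only [List.map_nil, List.foldl_nil, List.any_nil, Bool.and_false, if_neg Bool.false_ne_true]
  | cons x xs ih =>
    simp only [List.map_cons, List.foldl_cons, ih, List.any_cons, id]
    cases x <;> by_cases hb : c < best <;> simp [pvStep, hb]

-- B's min-index fold over the flat keyword list equals the first-matching-category index of A's chain
theorem pvFold_eq_chain (query : String) :
    pvKeywordCategory.foldl
      (fun best tc => if tc.2 < best && PySem.Str.isIn tc.1 (PySem.Str.lower query) then tc.2 else best) 4
    = (if [("technology" : String), "ai", "software", "digital"].any (fun term => PySem.Str.isIn term (PySem.Str.lower query)) then 0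
       else if [("market" : String), "business", "economic", "financial"].any (fun term => PySem.Str.isIn term (PySem.Str.lower query)) then 1
       else if [("health" : String), "medical", "research", "scientific"].any (fun term => PySem.Str.isIn term (PySem.Str.lower query)) then 2
       else if [("education" : String), "learning", "academic"].any (fun term => PySem.Str.isIn term (PySem.Str.lower query)) then 3
       else 4) := by
  have key : ∀ (g : String → Bool),
      pvKeywordCategory.foldl (fun best tc => if tc.2 < best && g tc.1 then tc.2 else best) 4
      = (([g "technology", g "ai", g "software", g "digital"].map (fun x => (x, 0)))
          ++ ([g "market", g "business", g "economic", g "financial"].map (fun x => (x, 1)))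
          ++ ([g "health", g "medical", g "research", g "scientific"].map (fun x => (x, 2)))
          ++ ([g "education", g "learning", g "academic"].map (fun x => (x, 3)))).foldl pvStep 4 := by
    intro g; rfl
  rw [key (fun t => PySem.Str.isIn t (PySem.Str.lower query))]
  rw [List.foldl_append, List.foldl_append, List.foldl_append]
  rw [pvBlock, pvBlock, pvBlock, pvBlock]
  simp only [List.any_cons, List.any_nil, Bool.or_false, id]
  generalize PySem.Str.isIn "technology" (PySem.Str.lower query) = t
  generalize PySem.Str.isIn "ai" (PySem.Str.lower query) = a
  generalize PySem.Str.isIn "software" (PySem.Str.lower query) = s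
  generalize PySem.Str.isIn "digital" (PySem.Str.lower query) = d
  generalize PySem.Str.isIn "market" (PySem.Str.lower query) = m
  generalize PySem.Str.isIn "business" (PySem.Str.lower query) = b
  generalize PySem.Str.isIn "economic" (PySem.Str.lower query) = e
  generalize PySem.Str.isIn "financial" (PySem.Str.lower query) = f
  generalize PySem.Str.isIn "health" (PySem.Str.lower query) = h
  generalize PySem.Str.isIn "medical" (PySem.Str.lower query) = me
  generalize PySem.Str.isIn "research" (PySem.Str.lower query) = r
  generalize PySem.Str.isIn "scientific" (PySem.Str.lower query) = sc
  generalize PySem.Str.isIn "education" (PySem.Str.lower query) = ed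
  generalize PySem.Str.isIn "learning" (PySem.Str.lower query) = l
  generalize PySem.Str.isIn "academic" (PySem.Str.lower query) = ac
  revert t a s d m b e f h me r sc ed l ac
  decide

-- ===== VERDICT (by name: the statement is the Claim_ definition above) =====
theorem generate_intelligent_followups_spec : Claim_equal_generate_intelligent_followups := by
  intro query response _
  unfold Spec_generate_intelligent_followups generate_intelligent_followups
    generate_intelligent_followups_alt
  dsimp only
  rw [pvFold_eq_chain query]
  split_ifs <;> rfl
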